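-- pv_equiv track=rewrite | github.com/EchanHe/SPROUT | make_mesh.py | split_ints_by_deli
-- ===== SOURCE A (Python) =====
-- def split_ints_by_deli(numbers, deli):
--     # Sort the list
--     sorted_numbers = sorted(numbers)
--
--     # Initialize variables
--     sublists = []
--     current_sublist = []
--
--     # Iterate through sorted numbers
--     for number in sorted_numbers:
--         # Append the number to the current sublist
--         current_sublist.append(number)
--
--         # Check if the number is greater than a multiple of 5
--         if number >= deli and number % deli == 0:
--             # Add the current sublist to the list of sublists
--             sublists.append(current_sublist)
--             # Start a new sublist
--             current_sublist = []
--
--     # Add any remaining numbers to the sublists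
--     if current_sublist:
--         sublists.append(current_sublist)
--
--     return sublists
-- ===== SOURCE B (Python) =====
-- def split_ints_by_deli(numbers, deli):
--     # Sort once, record the indices of all boundary elements, then build the
--     # output by slicing between consecutive cut points.
--     s = sorted(numbers)
--     cuts = [i for i, v in enumerate(s) if v >= deli and v % deli == 0]
--     out = []
--     prev = 0
--     for c in cuts:
--         out.append(s[prev:c + 1])
--         prev = c + 1
--     if prev < len(s):
--         out.append(s[prev:])
--     return out
-- ===== Notes on version B (the rewrite author's own statement) =====
-- stated objective: alternative
-- what changed: Replaces A's incremental accumulator (append each element to a current sublist, flush at boundaries) with an index table: one pass collects the indices of boundary elements, then the output is built by slicing the sorted list between consecutive cut points.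
import Mathlib
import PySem

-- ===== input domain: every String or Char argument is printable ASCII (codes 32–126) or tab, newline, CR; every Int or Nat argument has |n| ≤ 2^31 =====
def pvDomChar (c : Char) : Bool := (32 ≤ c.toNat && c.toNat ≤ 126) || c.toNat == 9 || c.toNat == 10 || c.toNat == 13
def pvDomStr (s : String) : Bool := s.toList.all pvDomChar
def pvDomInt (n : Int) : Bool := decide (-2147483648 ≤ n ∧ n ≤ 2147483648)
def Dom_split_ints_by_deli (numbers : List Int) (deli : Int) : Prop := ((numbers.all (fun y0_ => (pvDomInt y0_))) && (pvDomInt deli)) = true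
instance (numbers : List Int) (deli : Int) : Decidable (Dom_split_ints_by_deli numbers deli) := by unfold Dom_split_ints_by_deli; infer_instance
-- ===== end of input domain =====

-- B replaces A's incremental accumulator with a cut-index table plus slicing; same cost, different decomposition.

-- ===== PORT A =====
def split_ints_by_deli (numbers : List Int) (deli : Int) : List (List Int) :=
  let sorted_numbers := PySem.List.sorted numbers (fun x => x) false
  let st := sorted_numbers.foldl
    (fun (st : List (List Int) × List Int) number =>
      let cur := st.2 ++ [number]
      if deli ≤ number ∧ PySem.Int.mod number deli = 0 then (st.1 ++ [cur], ([] : List Int))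
      else (st.1, cur))
    ([], [])
  if st.2 ≠ [] then st.1 ++ [st.2] else st.1

-- ===== PORT B =====
def split_ints_by_deli_alt (numbers : List Int) (deli : Int) : List (List Int) :=
  let s := PySem.List.sorted numbers (fun x => x) false
  let cuts := ((PySem.List.enumerate s 0).filter
      (fun p => decide (deli ≤ p.2) && decide (PySem.Int.mod p.2 deli = 0))).map (·.1)
  let st := cuts.foldl
    (fun (st : List (List Int) × Int) c =>
      (st.1 ++ [PySem.List.slice s (some st.2) (some (c + 1))], c + 1))
    ([], 0)
  if st.2 < (s.length : Int) then st.1 ++ [PySem.List.slice s (some st.2) none] else st.1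

-- ===== PRECONDITION & SPEC =====
-- Pre_ excludes exactly the inputs where Python A raises ZeroDivisionError: deli = 0 with some
-- element ≥ 0 (the short-circuit `number >= deli` reaches `number % 0`). B raises there too.
def Pre_split_ints_by_deli (numbers : List Int) (deli : Int) : Prop :=
  ¬ (deli = 0 ∧ ∃ n ∈ numbers, 0 ≤ n)
instance (numbers : List Int) (deli : Int) : Decidable (Pre_split_ints_by_deli numbers deli) := by unfold Pre_split_ints_by_deli; infer_instance
def pvWitness_split_ints_by_deli : List Int × Int := ([7, 3, 10, -2, 5, 5], 5)

def Spec_split_ints_by_deli (numbers : List Int) (deli : Int) (out : List (List Int)) : Prop := out = split_ints_by_deli_alt numbers deli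
instance (numbers : List Int) (deli : Int) (out : List (List Int)) : Decidable (Spec_split_ints_by_deli numbers deli out) := by unfold Spec_split_ints_by_deli; infer_instance

-- ===== CLAIM (what is proved, stated in full; the proofs are below) =====
def Claim_equal_split_ints_by_deli : Prop := ∀ (numbers : List Int) (deli : Int), Dom_split_ints_by_deli numbers deli → Pre_split_ints_by_deli numbers deli → Spec_split_ints_by_deli numbers deli (split_ints_by_deli numbers deli)

-- ===== LEMMAS AND PROOFS =====

-- The common reference function: chunks of s, each ending at a boundary element,
-- plus an open trailing chunk.
def pvChunks (deli : Int) : List Int → List (List Int)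
  | [] => []
  | v :: t =>
    if deli ≤ v ∧ PySem.Int.mod v deli = 0 then [v] :: pvChunks deli t
    else
      match pvChunks deli t with
      | [] => [[v]]
      | c :: cs => (v :: c) :: cs

-- ---- A side ----

def pvAStep (deli : Int) (st : List (List Int) × List Int) (number : Int) : List (List Int) × List Int :=
  let cur := st.2 ++ [number]
  if deli ≤ number ∧ PySem.Int.mod number deli = 0 then (st.1 ++ [cur], ([] : List Int))
  else (st.1, cur)

lemma pvA_extract (deli : Int) (s : List Int) : ∀ (acc : List (List Int)) (cur : List Int),
    s.foldl (pvAStep deli) (acc, cur) =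
      (acc ++ (s.foldl (pvAStep deli) ([], cur)).1, (s.foldl (pvAStep deli) ([], cur)).2) := by
  induction s with
  | nil => intro acc cur; simp
  | cons v t ih =>
    intro acc cur
    by_cases h : deli ≤ v ∧ PySem.Int.mod v deli = 0
    · have hstep : ∀ a, pvAStep deli (a, cur) v = (a ++ [cur ++ [v]], []) := by
        intro a; simp [pvAStep, h]
      simp only [List.foldl_cons, hstep, List.nil_append]
      rw [ih (acc ++ [cur ++ [v]]) [], ih [cur ++ [v]] []]
      simp
    · have hstep : ∀ a, pvAStep deli (a, cur) v = (a, cur ++ [v]) := by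
        intro a; simp [pvAStep, h]
      simp only [List.foldl_cons, hstep]
      exact ih acc (cur ++ [v])

lemma pvA_main (deli : Int) (s : List Int) : ∀ (cur : List Int),
    (if (s.foldl (pvAStep deli) ([], cur)).2 ≠ [] then
        (s.foldl (pvAStep deli) ([], cur)).1 ++ [(s.foldl (pvAStep deli) ([], cur)).2]
      else (s.foldl (pvAStep deli) ([], cur)).1) =
      (match pvChunks deli s with
       | [] => if cur = [] then [] else [cur]
       | c :: cs => (cur ++ c) :: cs) := by
  induction s with
  | nil =>
    intro cur
    simp only [List.foldl_nil, pvChunks]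
    by_cases h : cur = [] <;> simp [h]
  | cons v t ih =>
    intro cur
    by_cases h : deli ≤ v ∧ PySem.Int.mod v deli = 0
    · have hstep : pvAStep deli ([], cur) v = ([cur ++ [v]], []) := by simp [pvAStep, h]
      simp only [List.foldl_cons, hstep]
      rw [pvA_extract deli t [cur ++ [v]] []]
      have hih := ih []
      rcases hX : List.foldl (pvAStep deli) (([] : List (List Int)), ([] : List Int)) t with ⟨out, rest⟩
      rw [hX] at hih
      have hch : (if rest ≠ [] then out ++ [rest] else out) = pvChunks deli t := by
        rw [hih]; cases pvChunks deli t <;> simp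
      simp only [pvChunks, if_pos h]
      rw [← hch]
      by_cases hr : rest = [] <;> simp [hr]
    · have hstep : pvAStep deli ([], cur) v = ([], cur ++ [v]) := by simp [pvAStep, h]
      simp only [List.foldl_cons, hstep]
      rw [ih (cur ++ [v])]
      simp only [pvChunks, if_neg h]
      cases hc : pvChunks deli t with
      | nil => simp
      | cons c cs => simp

-- ---- B side ----

-- cut indices, in Nat world, defined structurally
def pvCutsN (deli : Int) : List Int → List Nat
  | [] => []
  | v :: t =>
    (if deli ≤ v ∧ PySem.Int.mod v deli = 0 then [0] else []) ++ (pvCutsN deli t).map (· + 1)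

lemma pvEnum_shift {α : Type} (t : List α) : ∀ (k : Int),
    PySem.List.enumerate t (k + 1) = (PySem.List.enumerate t k).map (fun p => (p.1 + 1, p.2)) := by
  induction t with
  | nil => intro k; simp [PySem.List.enumerate_nil]
  | cons x xs ih =>
    intro k
    rw [PySem.List.enumerate_cons, PySem.List.enumerate_cons, List.map_cons, ih (k + 1)]

lemma pvCuts_eq (deli : Int) (s : List Int) :
    ((PySem.List.enumerate s 0).filter
        (fun p => decide (deli ≤ p.2) && decide (PySem.Int.mod p.2 deli = 0))).map (·.1) =
      (pvCutsN deli s).map (fun m : Nat => (m : Int)) := by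
  induction s with
  | nil => simp [PySem.List.enumerate_nil, pvCutsN]
  | cons v t ih =>
    have hfil := List.filter_congr (l := PySem.List.enumerate t 0)
        (p := (fun (p : Int × Int) => decide (deli ≤ p.2) && decide (PySem.Int.mod p.2 deli = 0)) ∘
          (fun p => (p.1 + 1, p.2)))
        (q := fun p => decide (deli ≤ p.2) && decide (PySem.Int.mod p.2 deli = 0)) (fun x _ => rfl)
    have key : (((PySem.List.enumerate t 0).map (fun p => (p.1 + 1, p.2))).filter
          (fun p => decide (deli ≤ p.2) && decide (PySem.Int.mod p.2 deli = 0))).map (·.1) =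
        ((pvCutsN deli t).map (fun m : Nat => m + 1)).map (fun m : Nat => (m : Int)) := by
      rw [List.filter_map, hfil, List.map_map,
        show ((fun (x : Int × Int) => x.1) ∘ (fun (p : Int × Int) => (p.1 + 1, p.2))) =
          ((· + 1) ∘ (fun (x : Int × Int) => x.1)) from rfl,
        ← List.map_map, ih, List.map_map, List.map_map]
      apply List.map_congr_left
      intro x _
      simp only [Function.comp_apply]
      push_cast
      ring
    by_cases hq : deli ≤ v ∧ PySem.Int.mod v deli = 0
    · have hb : (decide (deli ≤ v) && decide (PySem.Int.mod v deli = 0)) = true := by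
        obtain ⟨h1, h2⟩ := hq; simp [h1, h2]
      rw [PySem.List.enumerate_cons, pvEnum_shift t 0, List.filter_cons]
      simp only [hb, if_true, List.map_cons]
      rw [key]
      simp [pvCutsN, hq]
    · have hb : (decide (deli ≤ v) && decide (PySem.Int.mod v deli = 0)) = false := by
        simp only [not_and] at hq
        by_cases h1 : deli ≤ v
        · simp [h1, hq h1]
        · simp [h1]
      rw [PySem.List.enumerate_cons, pvEnum_shift t 0, List.filter_cons]
      simp only [hb, Bool.false_eq_true, if_false]
      rw [key]
      simp [pvCutsN, hq]

-- the slicing loop, in Nat world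
def pvBLoop (s : List Int) : List Nat → List (List Int) × Nat → List (List Int) × Nat
  | [], st => st
  | c :: rest, (out, prev) => pvBLoop s rest (out ++ [(s.drop prev).take (c + 1 - prev)], c + 1)

lemma pvBLoop_eq_port (s : List Int) : ∀ (cuts : List Nat) (out : List (List Int)) (n : Nat),
    (cuts.map (fun m : Nat => (m : Int))).foldl
        (fun (st : List (List Int) × Int) c =>
          (st.1 ++ [PySem.List.slice s (some st.2) (some (c + 1))], c + 1))
        (out, (n : Int)) =
      ((pvBLoop s cuts (out, n)).1, ((pvBLoop s cuts (out, n)).2 : Int)) := by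
  intro cuts
  induction cuts with
  | nil => intro out n; simp [pvBLoop]
  | cons c rest ih =>
    intro out n
    simp only [List.map_cons, List.foldl_cons, pvBLoop]
    have h1 : ((c : Int) + 1) = ((c + 1 : Nat) : Int) := by push_cast; ring
    rw [h1, PySem.List.slice_natCast]
    exact ih _ (c + 1)

lemma pvBLoop_extract (s : List Int) : ∀ (cuts : List Nat) (out : List (List Int)) (n : Nat),
    pvBLoop s cuts (out, n) =
      (out ++ (pvBLoop s cuts ([], n)).1, (pvBLoop s cuts ([], n)).2) := by
  intro cuts
  induction cuts with
  | nil => intro out n; simp [pvBLoop]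
  | cons c rest ih =>
    intro out n
    simp only [pvBLoop]
    rw [ih (out ++ _) (c + 1), ih ([] ++ _) (c + 1)]
    simp

lemma pvBLoop_shift (v : Int) (t : List Int) : ∀ (cuts : List Nat) (out : List (List Int)) (n : Nat),
    pvBLoop (v :: t) (cuts.map (· + 1)) (out, n + 1) =
      ((pvBLoop t cuts (out, n)).1, (pvBLoop t cuts (out, n)).2 + 1) := by
  intro cuts
  induction cuts with
  | nil => intro out n; simp [pvBLoop]
  | cons c rest ih =>
    intro out n
    simp only [List.map_cons, pvBLoop, List.drop_succ_cons]
    have h : c + 1 + 1 - (n + 1) = c + 1 - n := by omega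
    rw [h]
    exact ih _ (c + 1)

-- the whole B body (post-sort), in Nat world
def pvBFin (deli : Int) (s : List Int) : List (List Int) :=
  let st := pvBLoop s (pvCutsN deli s) ([], 0)
  if st.2 < s.length then st.1 ++ [s.drop st.2] else st.1

lemma pvBFin_eq_chunks (deli : Int) : ∀ (s : List Int), pvBFin deli s = pvChunks deli s := by
  intro s
  induction s with
  | nil => simp [pvBFin, pvBLoop, pvCutsN, pvChunks]
  | cons v t ih =>
    by_cases hq : deli ≤ v ∧ PySem.Int.mod v deli = 0
    · -- boundary head: the first chunk is [v], the rest shifts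
      have hstep : pvBFin deli (v :: t) = [v] :: pvBFin deli t := by
        simp only [pvBFin, pvCutsN, if_pos hq, List.singleton_append, pvBLoop]
        rw [show ((v :: t).drop 0).take (0 + 1 - 0) = [v] from rfl]
        simp only [List.nil_append]
        rw [pvBLoop_extract (v :: t) ((pvCutsN deli t).map (· + 1)) [[v]] (0 + 1),
          pvBLoop_shift v t (pvCutsN deli t) [] 0]
        rcases pvBLoop t (pvCutsN deli t) ([], 0) with ⟨out, prev⟩
        by_cases hlt : prev < t.length
        · simp [hlt]
        · simp [hlt]
      rw [hstep, ih]
      simp only [pvChunks]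
      rw [if_pos hq]
    · -- non-boundary head: v is prepended to the first chunk
      have hstep : pvBFin deli (v :: t) =
          (match pvBFin deli t with
           | [] => [[v]]
           | c :: cs => (v :: c) :: cs) := by
        simp only [pvBFin, pvCutsN, if_neg hq, List.nil_append]
        cases hc : pvCutsN deli t with
        | nil =>
          simp only [List.map_nil, pvBLoop, List.length_cons]
          cases t with
          | nil => simp
          | cons w u => simp
        | cons c rest =>
          simp only [List.map_cons, pvBLoop, List.drop_zero, Nat.sub_zero]
          rw [show (v :: t).take (c + 1 + 1) = v :: t.take (c + 1) from List.take_succ_cons]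
          simp only [List.nil_append]
          rw [pvBLoop_extract (v :: t) (rest.map (· + 1)) [v :: t.take (c + 1)] (c + 1 + 1),
            pvBLoop_shift v t rest [] (c + 1),
            pvBLoop_extract t rest [t.take (c + 1)] (c + 1)]
          rcases pvBLoop t rest ([], c + 1) with ⟨out, prev⟩
          by_cases hlt : prev < t.length
          · simp [hlt]
          · simp [hlt]
      rw [hstep, ih]
      simp only [pvChunks]
      rw [if_neg hq]

-- ===== VERDICT (by name: the statement is the Claim_ definition above) =====
theorem split_ints_by_deli_spec : Claim_equal_split_ints_by_deli := by
  intro numbers deli _ _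
  unfold Spec_split_ints_by_deli split_ints_by_deli split_ints_by_deli_alt
  simp only []
  rw [show (fun (st : List (List Int) × List Int) (number : Int) =>
        let cur := st.2 ++ [number];
        if deli ≤ number ∧ PySem.Int.mod number deli = 0 then (st.1 ++ [cur], ([] : List Int))
        else (st.1, cur)) = pvAStep deli from rfl]
  rw [pvCuts_eq deli]
  rw [show ((0 : Int)) = ((0 : Nat) : Int) from rfl,
    pvBLoop_eq_port (PySem.List.sorted numbers (fun x => x) false)
      (pvCutsN deli (PySem.List.sorted numbers (fun x => x) false)) [] 0]
  have hB := pvBFin_eq_chunks deli (PySem.List.sorted numbers (fun x => x) false)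
  have hA0 := pvA_main deli (PySem.List.sorted numbers (fun x => x) false) []
  have hA : (if (List.foldl (pvAStep deli) ([], [])
          (PySem.List.sorted numbers (fun x => x) false)).2 ≠ [] then
        (List.foldl (pvAStep deli) ([], []) (PySem.List.sorted numbers (fun x => x) false)).1 ++
          [(List.foldl (pvAStep deli) ([], []) (PySem.List.sorted numbers (fun x => x) false)).2]
      else (List.foldl (pvAStep deli) ([], []) (PySem.List.sorted numbers (fun x => x) false)).1) =
      pvChunks deli (PySem.List.sorted numbers (fun x => x) false) := by
    rw [hA0]
    cases pvChunks deli (PySem.List.sorted numbers (fun x => x) false) <;> simp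
  simp only [pvBFin] at hB
  rcases hst : pvBLoop (PySem.List.sorted numbers (fun x => x) false)
      (pvCutsN deli (PySem.List.sorted numbers (fun x => x) false)) ([], 0) with ⟨out, prev⟩
  rw [hst] at hB
  simp only [] at hB ⊢
  rw [hA, ← hB]
  by_cases hlt : prev < (PySem.List.sorted numbers (fun x => x) false).length
  · rw [if_pos hlt, if_pos (show (prev : Int) <
        ((PySem.List.sorted numbers (fun x => x) false).length : Int) by exact_mod_cast hlt),
      PySem.List.slice_from_natCast]
  · rw [if_neg hlt, if_neg (show ¬ (prev : Int) <
        ((PySem.List.sorted numbers (fun x => x) false).length : Int) by exact_mod_cast hlt)]
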